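-- pv_equiv track=rewrite | github.com/miclas/fromBegin | checkio_home.py | threeWords
-- ===== SOURCE A (Python) =====
-- def threeWords(words: str) -> bool:
--     x = words.split()
--     suma = 0
--     for a in x:
--         if a.isdigit():
--             suma = 0
--         else:
--             suma += 1
--             if suma == 3:
--                 return True
--     return False
-- ===== SOURCE B (Python) =====
-- def threeWords(words: str) -> bool:
--     flags = ''.join('1' if w.isdigit() else '0' for w in words.split())
--     return '000' in flags
-- ===== Notes on version B (the rewrite author's own statement) =====
-- stated objective: idiomatic
-- what changed: Replaces the running counter with reset branch and early return by building a per-word digit-flag string and testing it for a substring of three consecutive zero flags.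
import Mathlib
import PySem

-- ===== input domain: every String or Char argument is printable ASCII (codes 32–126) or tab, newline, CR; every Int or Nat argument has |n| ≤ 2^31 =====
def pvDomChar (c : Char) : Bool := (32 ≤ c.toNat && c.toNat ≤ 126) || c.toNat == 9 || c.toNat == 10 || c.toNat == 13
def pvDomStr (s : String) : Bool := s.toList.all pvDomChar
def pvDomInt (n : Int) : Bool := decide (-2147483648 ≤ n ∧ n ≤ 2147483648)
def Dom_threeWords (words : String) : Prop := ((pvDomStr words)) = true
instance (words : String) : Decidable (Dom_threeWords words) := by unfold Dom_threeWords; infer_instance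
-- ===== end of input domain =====

-- B replaces A's running counter / reset / early-return loop by flag-string construction
-- plus a substring search over the flag string: an idiomatic build-then-search decomposition.

-- ===== PORT A =====
-- the for-loop over the split words with the counter `suma` and the early return
def threeWordsLoop : List String → Nat → Bool
  | [], _ => false
  | a :: rest, suma =>
    if PySem.Str.strIsdigit a then threeWordsLoop rest 0
    else if suma + 1 = 3 then true
    else threeWordsLoop rest (suma + 1)

def threeWords (words : String) : Bool :=
  threeWordsLoop (PySem.Str.split₀ words) 0

-- ===== PORT B =====
-- flags is built as the List Char of the joined one-char flag string; '000' in flags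
def threeWords_alt (words : String) : Bool :=
  let flags : List Char :=
    (PySem.Str.split₀ words).map (fun w => if PySem.Str.strIsdigit w then '1' else '0')
  PySem.Chars.isIn ['0', '0', '0'] flags

-- ===== PRECONDITION & SPEC =====
def Spec_threeWords (words : String) (out : Bool) : Prop := out = threeWords_alt words
instance (words : String) (out : Bool) : Decidable (Spec_threeWords words out) := by
  unfold Spec_threeWords; infer_instance

-- ===== CLAIM (what is proved, stated in full; the proofs are below) =====
def Claim_equal_threeWords : Prop :=
  ∀ (words : String), Dom_threeWords words → Spec_threeWords words (threeWords words)

-- ===== LEMMAS AND PROOFS =====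

-- loop invariant: with `s ≤ 2` non-digit words already counted, A's loop answers whether
-- '000' occurs in `s` zeros followed by the flags of the remaining words
theorem threeWordsLoop_eq_isIn (ws : List String) :
    ∀ s : Nat, s ≤ 2 →
      threeWordsLoop ws s =
        PySem.Chars.isIn ['0', '0', '0']
          (List.replicate s '0' ++ ws.map (fun w => if PySem.Str.strIsdigit w then '1' else '0')) := by
  induction ws with
  | nil =>
    intro s hs
    interval_cases s <;> decide
  | cons a rest ih =>
    intro s hs
    by_cases hd : PySem.Str.strIsdigit a = true
    · have h0 := ih 0 (by omega)
      simp only [threeWordsLoop, hd, if_true, List.map_cons, h0]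
      rw [Bool.eq_iff_iff, PySem.Chars.isIn_iff_infix, PySem.Chars.isIn_iff_infix]
      interval_cases s <;>
        simp [List.infix_cons_iff, List.cons_prefix_cons]
    · simp only [threeWordsLoop, hd, List.map_cons]
      by_cases h3 : s + 1 = 3
      · have hs2 : s = 2 := by omega
        subst hs2
        simp only [if_true]
        rw [Bool.eq_iff_iff, PySem.Chars.isIn_iff_infix]
        simp [List.infix_cons_iff, List.cons_prefix_cons]
      · have hlt : s + 1 ≤ 2 := by omega
        have h1 := ih (s + 1) hlt
        simp only [h3, if_false, h1, List.replicate_succ']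
        simp
-- ===== VERDICT (by name: the statement is the Claim_ definition above) =====
theorem threeWords_spec : Claim_equal_threeWords := by
  intro words _
  unfold Spec_threeWords threeWords threeWords_alt
  simpa using threeWordsLoop_eq_isIn (PySem.Str.split₀ words) 0 (by omega)
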